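-- pv_equiv track=rewrite | github.com/geometalab/geoconverter | OGRgeoConverter/geoconverter/filematching.py | _get_free_file_name_number
-- ===== SOURCE A (Python) =====
-- def _get_free_file_name_number(base_name, existing_names, start_number=2):
--     for i in range(start_number, 100):
--         # for i in range(start_number, int.-----------):
--         new_found = True
--         for j in range(len(existing_names)):
--             if base_name + str(i) == existing_names[j]:
--                 new_found = False
--         if new_found:
--             break
--     return i
-- ===== SOURCE B (Python) =====
-- def _canonical_int(t):
--     """Return v if t is exactly str(v) for some int v, else None."""
--     s = t[1:] if t[:1] == '-' else t
--     if not s.isdigit():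
--         return None
--     v = -int(s) if t[:1] == '-' else int(s)
--     return v if str(v) == t else None
--
--
-- def _get_free_file_name_number(base_name, existing_names, start_number=2):
--     # Collect the numbers already used as exact numeric suffixes of base_name,
--     # then find the smallest missing number >= start_number by one pointer scan
--     # over the sorted distinct values; the result is capped at 99 (A's last
--     # candidate). No candidate is ever probed against the name list.
--     k = len(base_name)
--     taken = set()
--     for name in existing_names:
--         if name.startswith(base_name):
--             v = _canonical_int(name[k:])
--             if v is not None:
--                 taken.add(v)
--     i = start_number
--     for v in sorted(taken):
--         if v == i:
--             i += 1
--         elif v > i: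
--             break
--     return min(i, 99)
-- ===== Notes on version B (the rewrite author's own statement) =====
-- stated objective: faster
-- what changed: B never probes candidate numbers against the name list: one pass extracts each name's exact numeric suffix value (t such that t == str(v)), then the answer is the smallest missing value >= start_number found by a single pointer walk over the sorted distinct taken values, capped at 99; A instead tries every candidate i and rescans all names for base_name+str(i). Pre_ excludes start_number >= 100, where range(start_number, 100) is empty and A raises UnboundLocalError (B returns 99 there).
import Mathlib
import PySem

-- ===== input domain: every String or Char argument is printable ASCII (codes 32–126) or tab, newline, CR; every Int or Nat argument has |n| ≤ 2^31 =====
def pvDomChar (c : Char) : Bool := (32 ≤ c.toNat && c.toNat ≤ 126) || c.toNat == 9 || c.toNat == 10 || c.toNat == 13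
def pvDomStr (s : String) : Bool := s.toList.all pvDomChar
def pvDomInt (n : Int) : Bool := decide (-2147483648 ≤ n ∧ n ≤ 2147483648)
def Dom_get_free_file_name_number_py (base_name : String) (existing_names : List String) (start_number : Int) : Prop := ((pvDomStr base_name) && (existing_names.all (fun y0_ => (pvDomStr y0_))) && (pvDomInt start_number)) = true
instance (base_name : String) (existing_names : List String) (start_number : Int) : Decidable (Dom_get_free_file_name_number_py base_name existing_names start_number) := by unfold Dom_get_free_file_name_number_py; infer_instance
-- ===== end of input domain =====

-- B drops A's candidate probing entirely: one pass extracts each name's exact numeric suffix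
-- value, and the answer is the smallest missing value ≥ start_number found by a pointer walk
-- over the sorted distinct taken values, capped at 99 (objective: faster).

-- ===== PORT A =====
-- inner loop: 'for j in range(len(existing_names)): if base_name + str(i) == existing_names[j]: new_found = False'
def pyA_inner (base_name : String) (existing_names : List String) (i : Int) : Bool :=
  existing_names.foldl
    (fun new_found name =>
      if base_name.toList ++ PySem.Int.toChars i == name.toList then false else new_found)
    true

-- outer loop: 'for i in range(start_number, 100): … if new_found: break; return i' — recursion on the
-- (lazy) loop counter, invariant i < 100; when the loop exhausts without break, the last i (= 99) is returned.
def pyA_loop (base_name : String) (existing_names : List String) (i : Int) : Int :=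
  if pyA_inner base_name existing_names i then i
  else if h : i + 1 < 100 then pyA_loop base_name existing_names (i + 1) else i
termination_by (100 - i).toNat
decreasing_by omega

-- the outer 'if' only makes the recursion total: when range(start_number, 100) is empty A raises
-- UnboundLocalError (excluded by Pre_), so the 0 is never returned under Pre_.
def get_free_file_name_number_py (base_name : String) (existing_names : List String) (start_number : Int) : Int :=
  if start_number < 100 then pyA_loop base_name existing_names start_number else 0

-- ===== PORT B =====
-- '_canonical_int(t)': t[:1]/t[1:] are nonnegative-bound slices; s.isdigit() is Chars.strIsdigit;
-- 'int(s)' on a pure digit string is exactly the decimal foldl used here; 'str(v) == t' is toChars.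
def pyB_parse (t : List Char) : Option Int :=
  let s := if PySem.Chars.slice t none (some 1) = ['-'] then PySem.Chars.slice t (some 1) none else t
  if PySem.Chars.strIsdigit s then
    let m : Int := s.foldl (fun a c => 10 * a + ((c.toNat : Int) - 48)) 0
    let v : Int := if PySem.Chars.slice t none (some 1) = ['-'] then -m else m
    if PySem.Int.toChars v = t then some v else none
  else none

-- first pass: 'for name in existing_names: if name.startswith(base_name): v = _canonical_int(name[k:]); if v is not None: taken.add(v)'
def pyB_taken (base_name : String) (existing_names : List String) : PySem.Set Int :=
  existing_names.foldl
    (fun taken name =>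
      if PySem.Chars.startswith name.toList base_name.toList then
        match pyB_parse (PySem.Chars.slice name.toList (some (PySem.Chars.len base_name.toList : Int)) none) with
        | some v => PySem.Set.add taken v
        | none => taken
      else taken)
    PySem.Set.empty

-- second pass: 'i = start_number; for v in sorted(taken): if v == i: i += 1; elif v > i: break'
def pyB_scan (i : Int) : List Int → Int
  | [] => i
  | v :: vs => if v == i then pyB_scan (i + 1) vs else if v > i then i else pyB_scan i vs

-- 'return min(i, 99)'
def get_free_file_name_number_py_alt (base_name : String) (existing_names : List String) (start_number : Int) : Int :=
  min (pyB_scan start_number (PySem.List.sorted (pyB_taken base_name existing_names) (fun x => x) false)) 99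

-- ===== PRECONDITION & SPEC =====
-- Pre_ excludes start_number ≥ 100, where range(start_number, 100) is empty and A raises
-- UnboundLocalError; B naturally returns 99 there (see Raises_ below).
def Pre_get_free_file_name_number_py (base_name : String) (existing_names : List String) (start_number : Int) : Prop :=
  start_number < 100
instance (base_name : String) (existing_names : List String) (start_number : Int) : Decidable (Pre_get_free_file_name_number_py base_name existing_names start_number) := by unfold Pre_get_free_file_name_number_py; infer_instance

def pvWitness_get_free_file_name_number_py : String × List String × Int := ("file", ["file2", "file3"], 2)

def Spec_get_free_file_name_number_py (base_name : String) (existing_names : List String) (start_number : Int) (out : Int) : Prop := out = get_free_file_name_number_py_alt base_name existing_names start_number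
instance (base_name : String) (existing_names : List String) (start_number : Int) (out : Int) : Decidable (Spec_get_free_file_name_number_py base_name existing_names start_number out) := by unfold Spec_get_free_file_name_number_py; infer_instance

-- ===== CLAIM (what is proved, stated in full; the proofs are below) =====
def Claim_equal_get_free_file_name_number_py : Prop := ∀ (base_name : String) (existing_names : List String) (start_number : Int), Dom_get_free_file_name_number_py base_name existing_names start_number → Pre_get_free_file_name_number_py base_name existing_names start_number → Spec_get_free_file_name_number_py base_name existing_names start_number (get_free_file_name_number_py base_name existing_names start_number)

-- ===== LEMMAS AND PROOFS =====

-- spec-level decimal digit string of a natural number (the list Nat.toDigitsCore builds)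
def pvDigits (n : Nat) : List Char :=
  if h : n < 10 then [Nat.digitChar n]
  else pvDigits (n / 10) ++ [Nat.digitChar (n % 10)]
decreasing_by exact Nat.div_lt_self (by omega) (by omega)

theorem toDigitsCore_eq_pvDigits : ∀ (f n : Nat) (acc : List Char), 0 < f → n < 10 ^ f →
    Nat.toDigitsCore 10 f n acc = pvDigits n ++ acc := by
  intro f
  induction f with
  | zero => intro n acc hf h; omega
  | succ f ih =>
    intro n acc _ h
    rw [Nat.toDigitsCore]
    by_cases h10 : n < 10
    · have h0 : n / 10 = 0 := Nat.div_eq_of_lt h10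
      simp only [h0, if_pos]
      conv_rhs => rw [pvDigits]
      rw [dif_pos h10, Nat.mod_eq_of_lt h10]
      rfl
    · have hne : n / 10 ≠ 0 := by
        intro h0; exact h10 (by omega)
      simp only [if_neg hne]
      have hf : 0 < f := by
        rcases Nat.eq_zero_or_pos f with rfl | hf
        · exact absurd h (by omega)
        · exact hf
      have hlt : n / 10 < 10 ^ f := by
        rw [Nat.div_lt_iff_lt_mul (by omega)]
        calc n < 10 ^ (f + 1) := h
        _ = 10 ^ f * 10 := by ring
      rw [ih (n / 10) _ hf hlt]
      conv_rhs => rw [pvDigits]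
      rw [dif_neg h10, List.append_assoc]
      rfl

theorem toDigits_eq_pvDigits (n : Nat) : Nat.toDigits 10 n = pvDigits n := by
  have h : n < 10 ^ (n + 1) := by
    calc n < n + 1 := by omega
    _ ≤ 10 ^ (n + 1) := Nat.le_of_lt (Nat.lt_pow_self (by omega))
  simpa using toDigitsCore_eq_pvDigits (n + 1) n [] (by omega) h

theorem digitChar_isdigit {m : Nat} (h : m < 10) : PySem.Chars.isdigit (Nat.digitChar m) = true := by
  interval_cases m <;> decide

theorem digitChar_toNat {m : Nat} (h : m < 10) : (Nat.digitChar m).toNat = m + 48 := by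
  interval_cases m <;> decide

theorem pvDigits_ne_nil (n : Nat) : pvDigits n ≠ [] := by
  rw [pvDigits]
  split_ifs <;> simp

theorem pvDigits_all_digit (n : Nat) : ∀ c ∈ pvDigits n, PySem.Chars.isdigit c = true := by
  induction n using Nat.strong_induction_on with
  | _ n ih =>
    rw [pvDigits]
    split_ifs with h
    · intro c hc
      simp only [List.mem_singleton] at hc
      subst hc; exact digitChar_isdigit h
    · intro c hc
      rcases List.mem_append.mp hc with hc | hc
      · exact ih (n / 10) (Nat.div_lt_self (by omega) (by omega)) c hc
      · simp only [List.mem_singleton] at hc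
        subst hc; exact digitChar_isdigit (Nat.mod_lt _ (by omega))

theorem pvDigits_decode (n : Nat) :
    (pvDigits n).foldl (fun (a : Int) c => 10 * a + ((c.toNat : Int) - 48)) 0 = n := by
  suffices h : ∀ m, ∀ (a : Int), (pvDigits m).foldl (fun (a : Int) c => 10 * a + ((c.toNat : Int) - 48)) a = 10 ^ (pvDigits m).length * a + m by
    simpa using h n 0
  intro m
  induction m using Nat.strong_induction_on with
  | _ m ih =>
    intro a
    rw [pvDigits]
    split_ifs with h
    · simp only [List.foldl_cons, List.foldl_nil, List.length_singleton, digitChar_toNat h,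
        pow_one]
      push_cast
      ring
    · rw [List.foldl_append, ih (m / 10) (Nat.div_lt_self (by omega) (by omega))]
      simp only [List.foldl_cons, List.foldl_nil, List.length_append, List.length_singleton]
      rw [digitChar_toNat (Nat.mod_lt _ (by omega))]
      have hm : (m : Int) = 10 * (↑(m / 10)) + ↑(m % 10) := by
        push_cast [Nat.div_add_mod]
        omega
      rw [hm]
      push_cast
      ring

-- roundtrip: _canonical_int(str(v)) = v
theorem pyB_parse_toChars (v : Int) : pyB_parse (PySem.Int.toChars v) = some v := by
  unfold pyB_parse
  rcases lt_or_ge v 0 with hv | hv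
  · have ht : PySem.Int.toChars v = '-' :: pvDigits v.natAbs := by
      simp [PySem.Int.toChars, hv, toDigits_eq_pvDigits]
    rw [ht]
    have h1 : PySem.Chars.slice ('-' :: pvDigits v.natAbs) none (some 1) = ['-'] := by
      rw [PySem.Chars.slice_eq_listSlice, PySem.List.slice_to _ (by omega)]
      simp
    have h2 : PySem.Chars.slice ('-' :: pvDigits v.natAbs) (some 1) none = pvDigits v.natAbs := by
      rw [PySem.Chars.slice_eq_listSlice, PySem.List.slice_from _ (by omega)]
      simp
    simp only [h1, h2]
    have hdig : PySem.Chars.strIsdigit (pvDigits v.natAbs) = true := by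
      unfold PySem.Chars.strIsdigit
      simp only [Bool.and_eq_true, Bool.not_eq_true', List.isEmpty_eq_false_iff, List.all_eq_true]
      exact ⟨pvDigits_ne_nil _, pvDigits_all_digit _⟩
    simp only [hdig, if_pos]
    rw [pvDigits_decode]
    have hval : -(v.natAbs : Int) = v := by omega
    rw [hval, ht]
    simp
  · have ht : PySem.Int.toChars v = pvDigits v.toNat := by
      simp [PySem.Int.toChars, not_lt.mpr hv, toDigits_eq_pvDigits]
    rw [ht]
    have h1 : PySem.Chars.slice (pvDigits v.toNat) none (some 1) ≠ ['-'] := by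
      rw [PySem.Chars.slice_eq_listSlice, PySem.List.slice_to _ (by omega)]
      rcases hd : pvDigits v.toNat with _ | ⟨c, cs⟩
      · exact absurd hd (pvDigits_ne_nil _)
      · have hc : PySem.Chars.isdigit c = true := pvDigits_all_digit _ c (hd ▸ List.mem_cons_self)
        simp only [Int.toNat_one, List.take_succ_cons, List.take_zero, ne_eq, List.cons.injEq, and_true]
        intro hceq
        rw [hceq] at hc
        exact absurd hc (by decide)
    simp only [h1, if_false]
    have hdig : PySem.Chars.strIsdigit (pvDigits v.toNat) = true := by
      unfold PySem.Chars.strIsdigit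
      simp only [Bool.and_eq_true, Bool.not_eq_true', List.isEmpty_eq_false_iff, List.all_eq_true]
      exact ⟨pvDigits_ne_nil _, pvDigits_all_digit _⟩
    simp only [hdig, if_pos]
    rw [pvDigits_decode]
    have hval : (v.toNat : Int) = v := by omega
    rw [hval, ht]
    simp

-- parse succeeds only on the exact rendering of its value
theorem pyB_parse_some (t : List Char) (w : Int) (h : pyB_parse t = some w) :
    PySem.Int.toChars w = t := by
  unfold pyB_parse at h
  simp only at h
  split_ifs at h
  all_goals first
    | (rename_i hc; exact (Option.some.inj h) ▸ hc)
    | simp at h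

-- membership in B's taken set = 'some name is exactly base_name + str(v)'
theorem mem_pyB_taken (base_name : String) (existing_names : List String) (v : Int) :
    v ∈ pyB_taken base_name existing_names ↔
      ∃ name ∈ existing_names, name.toList = base_name.toList ++ PySem.Int.toChars v := by
  unfold pyB_taken
  suffices h : ∀ (s : PySem.Set Int),
      v ∈ existing_names.foldl
        (fun taken name =>
          if PySem.Chars.startswith name.toList base_name.toList then
            match pyB_parse (PySem.Chars.slice name.toList (some (PySem.Chars.len base_name.toList : Int)) none) with
            | some w => PySem.Set.add taken w
            | none => taken
          else taken) s ↔
      v ∈ s ∨ ∃ name ∈ existing_names, name.toList = base_name.toList ++ PySem.Int.toChars v by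
    simpa [PySem.Set.empty] using h PySem.Set.empty
  induction existing_names with
  | nil => simp
  | cons n ns ih =>
    intro s
    simp only [List.foldl_cons, List.mem_cons]
    rw [ih]
    have step : v ∈ (if PySem.Chars.startswith n.toList base_name.toList then
            match pyB_parse (PySem.Chars.slice n.toList (some (PySem.Chars.len base_name.toList : Int)) none) with
            | some w => PySem.Set.add s w
            | none => s
          else s) ↔ v ∈ s ∨ n.toList = base_name.toList ++ PySem.Int.toChars v := by
      by_cases hp : PySem.Chars.startswith n.toList base_name.toList
      · have hpre : base_name.toList <+: n.toList := (PySem.Chars.startswith_iff _ _).mp hp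
        have hdecomp : base_name.toList ++ n.toList.drop base_name.toList.length = n.toList :=
          List.prefix_iff_eq_append.mp hpre
        have hslice : PySem.Chars.slice n.toList (some (PySem.Chars.len base_name.toList : Int)) none =
            n.toList.drop base_name.toList.length := by
          rw [PySem.Chars.len_eq, PySem.Chars.slice_eq_listSlice, PySem.List.slice_from_natCast]
        rw [if_pos hp, hslice]
        rcases hparse : pyB_parse (n.toList.drop base_name.toList.length) with _ | w
        · -- suffix not canonical: n can not be base ++ str(v)
          constructor
          · exact Or.inl
          · rintro (hs | heq)
            · exact hs
            · exfalso
              have hdv : n.toList.drop base_name.toList.length = PySem.Int.toChars v := by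
                rw [heq, List.drop_left]
              rw [hdv, pyB_parse_toChars] at hparse
              exact absurd hparse (by simp)
        · rw [PySem.Set.mem_add]
          constructor
          · rintro (hs | rfl)
            · exact Or.inl hs
            · refine Or.inr ?_
              have hcanon := pyB_parse_some _ _ hparse
              rw [← hdecomp, ← hcanon]
          · rintro (hs | heq)
            · exact Or.inl hs
            · refine Or.inr ?_
              have hdv : n.toList.drop base_name.toList.length = PySem.Int.toChars v := by
                rw [heq, List.drop_left]
              rw [hdv, pyB_parse_toChars] at hparse
              exact (Option.some.inj hparse).symm ▸ rfl
      · rw [if_neg hp]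
        constructor
        · exact Or.inl
        · rintro (hs | heq)
          · exact hs
          · exact absurd ((PySem.Chars.startswith_iff _ _).mpr ⟨_, heq.symm⟩) hp
    rw [step]
    constructor
    · rintro ((hs | h1) | ⟨m, hm, he⟩)
      · exact Or.inl hs
      · exact Or.inr ⟨n, Or.inl rfl, h1⟩
      · exact Or.inr ⟨m, Or.inr hm, he⟩
    · rintro (hs | ⟨m, (rfl | hm), he⟩)
      · exact Or.inl (Or.inl hs)
      · exact Or.inl (Or.inr he)
      · exact Or.inr ⟨m, hm, he⟩

-- A's inner loop decides exactly 'i is not taken'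
theorem pyA_inner_iff (base_name : String) (existing_names : List String) (i : Int) :
    pyA_inner base_name existing_names i = true ↔
      ¬ ∃ name ∈ existing_names, name.toList = base_name.toList ++ PySem.Int.toChars i := by
  have hfold : ∀ (l : List String) (b : Bool),
      l.foldl (fun new_found name =>
        if base_name.toList ++ PySem.Int.toChars i == name.toList then false else new_found) b =
      (b && l.all (fun name => !(base_name.toList ++ PySem.Int.toChars i == name.toList))) := by
    intro l
    induction l with
    | nil => simp
    | cons n ns ih =>
      intro b
      simp only [List.foldl_cons, List.all_cons, ih]
      by_cases h : base_name.toList ++ PySem.Int.toChars i == n.toList <;> simp [h]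
  unfold pyA_inner
  rw [hfold]
  simp only [Bool.true_and, List.all_eq_true, Bool.not_eq_eq_eq_not, Bool.not_true,
    beq_eq_false_iff_ne, ne_eq]
  constructor
  · rintro hall ⟨m, hm, he⟩
    exact hall m hm he.symm
  · intro hne m hm he
    exact hne ⟨m, hm, he.symm⟩

-- B's taken set has no duplicates
theorem nodup_pyB_taken (base_name : String) (existing_names : List String) :
    (pyB_taken base_name existing_names : List Int).Nodup := by
  unfold pyB_taken
  suffices h : ∀ (s : PySem.Set Int), s.Nodup →
      (existing_names.foldl
        (fun taken name =>
          if PySem.Chars.startswith name.toList base_name.toList then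
            match pyB_parse (PySem.Chars.slice name.toList (some (PySem.Chars.len base_name.toList : Int)) none) with
            | some v => PySem.Set.add taken v
            | none => taken
          else taken) s).Nodup from h PySem.Set.empty (by simp [PySem.Set.empty])
  induction existing_names with
  | nil => intro s hs; exact hs
  | cons n ns ih =>
    intro s hs
    simp only [List.foldl_cons]
    apply ih
    split_ifs with hp
    · rcases pyB_parse (PySem.Chars.slice n.toList (some (PySem.Chars.len base_name.toList : Int)) none) with _ | w
      · exact hs
      · exact PySem.Set.nodup_add s w hs
    · exact hs

-- the sorted taken list is strictly increasing
theorem pairwise_sorted_taken (base_name : String) (existing_names : List String) :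
    (PySem.List.sorted (pyB_taken base_name existing_names) (fun x => x) false).Pairwise (· < ·) := by
  have hle := PySem.List.sorted_pairwise (pyB_taken base_name existing_names) (fun x : Int => x)
  have hnd : (PySem.List.sorted (pyB_taken base_name existing_names) (fun x : Int => x) false).Nodup :=
    (PySem.List.sorted_perm (pyB_taken base_name existing_names) (fun x : Int => x) false).nodup_iff.mpr
      (nodup_pyB_taken base_name existing_names)
  exact (hle.and hnd).imp (fun h => lt_of_le_of_ne h.1 h.2)

theorem scan_ge : ∀ (L : List Int) (i : Int), i ≤ pyB_scan i L := by
  intro L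
  induction L with
  | nil => intro i; simp [pyB_scan]
  | cons v vs ih =>
    intro i
    rw [pyB_scan]
    split_ifs with h1 h2
    · exact le_trans (by omega) (ih (i + 1))
    · exact le_refl i
    · exact ih i

theorem scan_not_mem : ∀ (L : List Int) (i : Int), i ∉ L → pyB_scan i L = i := by
  intro L
  induction L with
  | nil => intro i _; rfl
  | cons v vs ih =>
    intro i hmem
    rw [pyB_scan]
    have hv : v ≠ i := fun h => hmem (h ▸ List.mem_cons_self)
    rw [if_neg (by simpa using hv)]
    split_ifs with h2
    · rfl
    · exact ih i (fun h => hmem (List.mem_cons_of_mem _ h))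

theorem scan_mem : ∀ (L : List Int), L.Pairwise (· < ·) → ∀ i : Int, i ∈ L → pyB_scan i L = pyB_scan (i + 1) L := by
  intro L
  induction L with
  | nil => intro _ i h; simp at h
  | cons v vs ih =>
    intro hpw i hmem
    rcases List.mem_cons.mp hmem with rfl | hmem'
    · -- v = i: left scans the tail from i+1; right skips v (< i+1) and scans the tail from i+1
      rw [pyB_scan, if_pos (by simp)]
      rw [pyB_scan, if_neg (by simp), if_neg (by simp)]
    · have hvi : v < i := (List.pairwise_cons.mp hpw).1 i hmem'
      rw [pyB_scan, if_neg (by simp; omega), if_neg (by omega)]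
      rw [pyB_scan, if_neg (by simp; omega), if_neg (by omega)]
      exact ih (List.pairwise_cons.mp hpw).2 i hmem'

-- the two phases agree for every start below 100
theorem loops_agree (base_name : String) (existing_names : List String) :
    ∀ (n : Nat) (i : Int), (100 - i).toNat ≤ n → i < 100 →
      pyA_loop base_name existing_names i =
        min (pyB_scan i (PySem.List.sorted (pyB_taken base_name existing_names) (fun x => x) false)) 99 := by
  intro n
  induction n with
  | zero => intro i hn hi; omega
  | succ n ih =>
    intro i hn hi
    set L := PySem.List.sorted (pyB_taken base_name existing_names) (fun x : Int => x) false with hL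
    have hmemL : ∀ v : Int, v ∈ L ↔ ∃ name ∈ existing_names, name.toList = base_name.toList ++ PySem.Int.toChars v := by
      intro v
      rw [hL, PySem.List.mem_sorted, mem_pyB_taken]
    rw [pyA_loop]
    by_cases hfree : pyA_inner base_name existing_names i = true
    · rw [if_pos hfree]
      have hni : i ∉ L := fun h => (pyA_inner_iff base_name existing_names i).mp hfree ((hmemL i).mp h)
      rw [scan_not_mem L i hni]
      omega
    · rw [if_neg hfree]
      have hiL : i ∈ L := by
        rw [hmemL]
        by_contra hno
        exact hfree ((pyA_inner_iff base_name existing_names i).mpr hno)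
      rw [scan_mem L (pairwise_sorted_taken base_name existing_names) i hiL]
      split_ifs with hnext
      · exact ih (i + 1) (by omega) hnext
      · -- i = 99: the scan from 100 stays ≥ 100, so the min is 99
        have h99 : i = 99 := by omega
        subst h99
        have := scan_ge L ((99 : Int) + 1)
        omega

-- ===== VERDICT (by name: the statement is the Claim_ definition above) =====
theorem get_free_file_name_number_py_spec : Claim_equal_get_free_file_name_number_py := by
  intro base_name existing_names start_number _ hpre
  unfold Pre_get_free_file_name_number_py at hpre
  unfold Spec_get_free_file_name_number_py
  unfold get_free_file_name_number_py get_free_file_name_number_py_alt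
  rw [if_pos hpre]
  exact loops_agree base_name existing_names (100 - start_number).toNat start_number le_rfl hpre
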